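-- pv_equiv track=rewrite | github.com/iramulh/100_Sums_Python | main.py | start_num
-- ===== SOURCE A (Python) =====
-- def start_num(num):
--   """
--   Finds the first number in a consecutive sequence that adds up to the desired number. Takes the desired number.
--   """
--
--   #starting values for the sum, start, and adding numbers
--   add = 1
--   sum = 0
--   start = 0
--
--   while True:
--     #records the current adding number as the starting number
--     start = add
--
--     while True:
--       if add == num:
--         return add
--
--       #adds to the sum and increases the adding number by 1 to add consequetive numbers
--       sum += add
--       add += 1
--
--       #returns the starting number when it gets to the desired number
--       if sum == num:
--         return start
--
--       #resets the sum and makes the adding number 1 more from the current starting number before breaking out of the loop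
--       elif sum > num:
--         sum = 0
--         add = start + 1
--         break
-- ===== SOURCE B (Python) =====
-- def start_num(num):
--   """
--   Finds the first number in a consecutive sequence that adds up to the desired number. Takes the desired number.
--   """
--   # largest run length L with 1+2+...+L = L*(L+1)//2 <= num
--   L = 1
--   while (L + 1) * (L + 2) // 2 <= num:
--     L += 1
--   # scan run lengths downward; the longest feasible run has the smallest start
--   while True:
--     rem = num - L * (L - 1) // 2
--     if rem > 0 and rem % L == 0:
--       return rem // L
--     L -= 1
-- ===== Notes on version B (the rewrite author's own statement) =====
-- stated objective: faster
-- what changed: A brute-forces every candidate start, re-summing consecutive runs; B iterates the run length L downward from the largest L with L(L+1)/2 <= num and returns (num - L(L-1)/2)/L for the first L where that is a positive integer (the longest feasible run has the smallest start).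
import Mathlib
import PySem

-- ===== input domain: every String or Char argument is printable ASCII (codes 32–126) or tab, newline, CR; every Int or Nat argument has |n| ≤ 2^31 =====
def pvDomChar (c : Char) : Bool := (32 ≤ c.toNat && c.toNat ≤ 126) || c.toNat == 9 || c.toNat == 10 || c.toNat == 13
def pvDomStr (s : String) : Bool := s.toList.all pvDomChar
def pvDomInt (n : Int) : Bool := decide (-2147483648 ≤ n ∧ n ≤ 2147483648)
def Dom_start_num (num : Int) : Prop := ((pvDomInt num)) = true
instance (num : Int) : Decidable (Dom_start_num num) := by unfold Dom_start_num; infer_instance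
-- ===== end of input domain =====

-- B replaces A's brute-force scan over starting numbers by a downward scan over run lengths
-- (largest feasible length gives the smallest start); measured asymptotically faster.


-- ===== PORT A =====
-- A's two nested `while True` loops collapse to one tail recursion: the outer loop's only
-- effect is `start := add` after the inner `break` sets `add = start + 1`, `sum = 0`.
-- The loop is ported with sufficient fuel (A terminates for every num ≥ 1; see Pre_).
def loopA (fuel : Nat) (num sum add start : Int) : Int :=
  match fuel with
  | 0 => 0
  | f + 1 =>
    if add = num then add
    else
      let sum2 := sum + add
      let add2 := add + 1
      if sum2 = num then start
      else if sum2 > num then loopA f num 0 (start + 1) (start + 1)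
      else loopA f num sum2 add2 start

def start_num (num : Int) : Int :=
  loopA ((num.toNat + 2) * (num.toNat + 2)) num 0 1 1

-- ===== PORT B =====
-- first loop of Source B: largest L with (L+1)(L+2)//2 > num fails, i.e. L(L+1)/2 ≤ num
def findL (fuel : Nat) (num L : Int) : Int :=
  match fuel with
  | 0 => L
  | f + 1 =>
    if PySem.Int.floordiv ((L + 1) * (L + 2)) 2 ≤ num then findL f num (L + 1) else L

-- second loop of Source B: scan run lengths downward
def downL (fuel : Nat) (num L : Int) : Int :=
  match fuel with
  | 0 => 0
  | f + 1 =>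
    let rem := num - PySem.Int.floordiv (L * (L - 1)) 2
    if 0 < rem ∧ PySem.Int.mod rem L = 0 then PySem.Int.floordiv rem L
    else downL f num (L - 1)

def start_num_alt (num : Int) : Int :=
  downL (num.toNat + 2) num (findL (num.toNat + 2) num 1)

-- ===== PRECONDITION & SPEC =====
-- For num ≤ 0 A's loops never terminate (A returns on exactly the inputs num ≥ 1), so Pre_ is 1 ≤ num.
def Pre_start_num (num : Int) : Prop := 1 ≤ num
instance (num : Int) : Decidable (Pre_start_num num) := by unfold Pre_start_num; infer_instance
def pvWitness_start_num : Int := 15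

def Spec_start_num (num : Int) (out : Int) : Prop := out = start_num_alt num
instance (num : Int) (out : Int) : Decidable (Spec_start_num num out) := by unfold Spec_start_num; infer_instance

-- ===== CLAIM (what is proved, stated in full; the proofs are below) =====
def Claim_equal_start_num : Prop := ∀ (num : Int), Dom_start_num num → Pre_start_num num → Spec_start_num num (start_num num)

-- ===== LEMMAS AND PROOFS =====

-- `Good num s`: some consecutive run s, s+1, …, s+L-1 (L ≥ 1) sums to num; encoded without division.
def Good (num s : Int) : Prop := 1 ≤ s ∧ ∃ L, 1 ≤ L ∧ 2 * num = L * (2 * s + L - 1)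

-- some run of length exactly L sums to num
def ValidLen (num L : Int) : Prop := ∃ s, 1 ≤ s ∧ 2 * num = L * (2 * s + L - 1)

lemma good_self {num : Int} (h : 1 ≤ num) : Good num num :=
  ⟨h, 1, le_refl 1, by ring⟩

-- a longer run summing to num starts strictly lower
lemma anti_mono {num L1 s1 L2 s2 : Int} (h1 : 2 * num = L1 * (2 * s1 + L1 - 1))
    (h2 : 2 * num = L2 * (2 * s2 + L2 - 1)) (hs1 : 1 ≤ s1) (hs2 : 1 ≤ s2)
    (hL2 : 1 ≤ L2) (hLL : L2 < L1) : s1 < s2 := by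
  by_contra h
  push_neg at h
  nlinarith [mul_nonneg (by linarith : (0:Int) ≤ L2) (by linarith : (0:Int) ≤ s1 - s2),
             mul_nonneg (by linarith : (0:Int) ≤ L1 - L2) (by linarith : (0:Int) ≤ s1 - s2)]

lemma same_len {num L s1 s2 : Int} (h1 : 2 * num = L * (2 * s1 + L - 1))
    (h2 : 2 * num = L * (2 * s2 + L - 1)) (hL : 1 ≤ L) : s1 = s2 := by
  have hL0 : L ≠ 0 := by omega
  have h3 : L * (2 * s1) = L * (2 * s2) := by ring_nf at h1 h2 ⊢; linarith
  have := mul_left_cancel₀ hL0 h3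
  omega

-- the minimum of Good is unique
lemma min_unique {num a b : Int} (ha : Good num a) (hb : Good num b)
    (hma : ∀ s, Good num s → a ≤ s) (hmb : ∀ s, Good num s → b ≤ s) : a = b :=
  le_antisymm (hma b hb) (hmb a ha)

-- floordiv of an explicitly doubled value
lemma floordiv_double (k : Int) : PySem.Int.floordiv (k + k) 2 = k := by
  rw [PySem.Int.floordiv_eq_ediv_of_pos (by norm_num)]
  have : k + k = 2 * k := by ring
  rw [this, Int.mul_ediv_cancel_left k (by norm_num)]

-- ---------- A-side: loopA returns the minimal good start ----------

lemma loopA_correct (num : Int) (hnum : 1 ≤ num) :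
    ∀ fuel (sum add start : Int),
      1 ≤ start → start ≤ add →
      2 * sum = (add - start) * (start + add - 1) →
      sum < num →
      (∀ s, 1 ≤ s → s < start → ¬ Good num s) →
      (num - start).toNat * (num.toNat + 2) + (num - sum).toNat < fuel →
      Good num (loopA fuel num sum add start) ∧
        ∀ s, Good num s → loopA fuel num sum add start ≤ s := by
  intro fuel
  induction fuel with
  | zero => intro sum add start _ _ _ _ _ hf; omega
  | succ f ih =>
    intro sum add start hst1 hsta hsum hsn hmin hf
    have hstnum : start ≤ num := by
      by_contra h
      push_neg at h
      exact hmin num hnum h (good_self hnum)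
    rw [loopA]
    by_cases hadd : add = num
    · -- returns add = num
      simp only [hadd, if_true]
      refine ⟨good_self hnum, ?_⟩
      rintro s ⟨hs1, L, hL1, hEq⟩
      by_contra hlt
      push_neg at hlt
      -- s < num; s ≥ start by hmin
      have hss : start ≤ s := by
        by_contra h
        push_neg at h
        exact hmin s hs1 h ⟨hs1, L, hL1, hEq⟩
      rcases le_or_gt (s + L) add with hcase | hcase
      · -- run lies inside the already-scanned prefix [start, add): its sum ≤ sum < num
        nlinarith [mul_nonneg (by linarith : (0:Int) ≤ s - start) (by linarith : (0:Int) ≤ start + s - 1),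
                   mul_nonneg (by linarith : (0:Int) ≤ add - s - L) (by linarith : (0:Int) ≤ s + L - 1 + add)]
      · -- run reaches add = num: its sum is too big
        have hL2 : 2 ≤ L := by omega
        nlinarith
    · simp only [if_neg hadd]
      by_cases hs2 : sum + add = num
      · -- returns start
        simp only [if_pos hs2]
        have hgood : Good num start :=
          ⟨hst1, add + 1 - start, by omega, by nlinarith⟩
        refine ⟨hgood, ?_⟩
        intro s hs
        by_contra h
        push_neg at h
        exact hmin s hs.1 h hs
      · simp only [if_neg hs2]
        by_cases hgt : sum + add > num
        · -- break: start := start + 1, sum := 0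
          simp only [if_pos hgt]
          -- start < num here (start = num would force add = num or sum ≥ num)
          have hstlt : start < num := by
            rcases lt_or_eq_of_le hstnum with h | h
            · exact h
            · exfalso
              rcases lt_or_eq_of_le hsta with h2 | h2
              · nlinarith
              · exact hadd (by omega)
          have hnotgood : ¬ Good num start := by
            rintro ⟨_, L, hL1, hEq⟩
            rcases lt_trichotomy (start + L) (add + 1) with hc | hc | hc
            · -- run inside [start, add): sum ≤ old sum < num
              nlinarith [mul_nonneg (by linarith : (0:Int) ≤ add - start - L)
                           (by linarith : (0:Int) ≤ start + L - 1 + add)]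
            · -- run is exactly [start, add]: its sum is sum + add > num
              nlinarith
            · -- run goes past add: even bigger
              nlinarith [mul_nonneg (by linarith : (0:Int) ≤ start + L - 1 - add)
                           (by linarith : (0:Int) ≤ start + L - 1 + add + 1)]
          have hmin' : ∀ s, 1 ≤ s → s < start + 1 → ¬ Good num s := by
            intro s hs1 hlt
            rcases lt_or_eq_of_le (by omega : s ≤ start) with h | h
            · exact hmin s hs1 h
            · rw [h]; exact hnotgood
          refine ih 0 (start + 1) (start + 1) (by omega) (le_refl _) (by ring) (by omega) hmin' ?_
          -- fuel: the first component of the measure drops by one block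
          have ht : (num - start).toNat = (num - (start + 1)).toNat + 1 := by omega
          obtain ⟨p, hp⟩ : ∃ p, (num - (start + 1)).toNat * (num.toNat + 2) = p := ⟨_, rfl⟩
          have hq : (num - start).toNat * (num.toNat + 2) = p + (num.toNat + 2) := by
            rw [ht, Nat.succ_mul, hp]
          rw [hp]
          rw [hq] at hf
          omega
        · -- continue the inner loop
          simp only [if_neg hgt]
          have hlt : sum + add < num := by omega
          refine ih (sum + add) (add + 1) start hst1 (by omega) (by nlinarith) hlt hmin ?_
          obtain ⟨p, hp⟩ : ∃ p, (num - start).toNat * (num.toNat + 2) = p := ⟨_, rfl⟩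
          rw [hp] at hf ⊢
          omega

lemma start_num_minimal (num : Int) (hnum : 1 ≤ num) :
    Good num (start_num num) ∧ ∀ s, Good num s → start_num num ≤ s := by
  have hfuel : (num - 1).toNat * (num.toNat + 2) + (num - 0).toNat
      < (num.toNat + 2) * (num.toNat + 2) := by
    obtain ⟨a, ha⟩ : ∃ a, (num - 1).toNat = a := ⟨_, rfl⟩
    have h1 : num.toNat = a + 1 := by omega
    have h2 : (num - 0).toNat = a + 1 := by omega
    rw [ha, h1, h2]
    nlinarith
  exact loopA_correct num hnum _ 0 1 1 (le_refl 1) (le_refl 1) (by ring) (by omega)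
    (by intro s hs1 hlt; omega) hfuel

-- ---------- B-side: findL/downL return the minimal good start ----------

lemma findL_correct (num : Int) (hnum : 1 ≤ num) :
    ∀ fuel (L : Int), 1 ≤ L → L * (L + 1) ≤ 2 * num → num.toNat ≤ L.toNat + fuel →
      1 ≤ findL fuel num L ∧ findL fuel num L * (findL fuel num L + 1) ≤ 2 * num ∧
        2 * num < (findL fuel num L + 1) * (findL fuel num L + 2) := by
  intro fuel
  induction fuel with
  | zero =>
    intro L hL1 hle hfb
    have hnl : num ≤ L := by omega
    rw [findL]
    exact ⟨hL1, hle, by nlinarith⟩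
  | succ f ih =>
    intro L hL1 hle hfb
    rw [findL]
    obtain ⟨k, hk⟩ : Even ((L + 1) * (L + 1 + 1)) := Int.even_mul_succ_self (L + 1)
    have hfd : PySem.Int.floordiv ((L + 1) * (L + 2)) 2 = k := by
      have h2 : (L + 1) * (L + 2) = k + k := by rw [← hk]; ring
      rw [h2, floordiv_double]
    rw [hfd]
    by_cases hg : k ≤ num
    · simp only [if_pos hg]
      refine ih (L + 1) (by omega) (by nlinarith [hk]) (by omega)
    · simp only [if_neg hg]
      push_neg at hg
      exact ⟨hL1, hle, by nlinarith [hk]⟩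

lemma downL_correct (num : Int) (hnum : 1 ≤ num) :
    ∀ fuel (L : Int), 1 ≤ L → L.toNat ≤ fuel →
      (∀ L', L < L' → ¬ ValidLen num L') →
      Good num (downL fuel num L) ∧ ∀ s, Good num s → downL fuel num L ≤ s := by
  intro fuel
  induction fuel with
  | zero => intro L hL1 hfb _; omega
  | succ f ih =>
    intro L hL1 hfb hinv
    rw [downL]
    obtain ⟨k, hk⟩ : Even (L * (L - 1)) := by
      have : L * (L - 1) = (L - 1) * ((L - 1) + 1) := by ring
      rw [this]; exact Int.even_mul_succ_self (L - 1)
    have hfd : PySem.Int.floordiv (L * (L - 1)) 2 = k := by rw [hk, floordiv_double]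
    simp only [hfd]
    by_cases hg : 0 < num - k ∧ PySem.Int.mod (num - k) L = 0
    · simp only [if_pos hg]
      obtain ⟨hpos, hmod⟩ := hg
      obtain ⟨s', hs'⟩ : L ∣ (num - k) := (PySem.Int.mod_eq_zero_iff_dvd _ _).mp hmod
      have hL0 : L ≠ 0 := by omega
      have hfd2 : PySem.Int.floordiv (num - k) L = s' := by
        rw [hs', PySem.Int.floordiv_eq_ediv_of_pos (by omega), Int.mul_ediv_cancel_left s' hL0]
      rw [hfd2]
      have hs'1 : 1 ≤ s' := by nlinarith [hs', hpos]
      have hgl : 2 * num = L * (2 * s' + L - 1) := by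
        nlinarith [hs', hk]
      refine ⟨⟨hs'1, L, hL1, hgl⟩, ?_⟩
      rintro s ⟨hs1, L2, hL21, hEq2⟩
      rcases lt_trichotomy L2 L with hc | hc | hc
      · exact le_of_lt (anti_mono hgl hEq2 hs'1 hs1 hL21 hc)
      · rw [hc] at hEq2
        rw [same_len hgl hEq2 hL1]
      · exact absurd ⟨s, hs1, hEq2⟩ (hinv L2 hc)
    · simp only [if_neg hg]
      push_neg at hg
      -- L = 1 always satisfies the guard, so here 2 ≤ L
      have hL2 : 2 ≤ L := by
        by_contra h
        push_neg at h
        have hLe : L = 1 := by omega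
        subst hLe
        have hk0 : k = 0 := by nlinarith [hk]
        subst hk0
        have h1 : PySem.Int.mod (num - 0) 1 = 0 :=
          (PySem.Int.mod_eq_zero_iff_dvd _ _).mpr (one_dvd _)
        have := hg (by omega)
        exact this h1
      have hinv' : ∀ L', L - 1 < L' → ¬ ValidLen num L' := by
        intro L' hlt hval
        rcases lt_or_eq_of_le (by omega : L ≤ L') with h | h
        · exact hinv L' h hval
        · obtain ⟨s, hs1, hEq⟩ := hval
          rw [← h] at hEq
          have hrem : num - k = L * s := by nlinarith [hk]
          have hpos : 0 < num - k := by nlinarith [hk]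
          have hmod : PySem.Int.mod (num - k) L = 0 :=
            (PySem.Int.mod_eq_zero_iff_dvd _ _).mpr ⟨s, hrem⟩
          exact (hg hpos) hmod
      exact ih (L - 1) (by omega) (by omega) hinv'

lemma start_num_alt_minimal (num : Int) (hnum : 1 ≤ num) :
    Good num (start_num_alt num) ∧ ∀ s, Good num s → start_num_alt num ≤ s := by
  obtain ⟨hM1, hMle, hMgt⟩ :=
    findL_correct num hnum (num.toNat + 2) 1 (le_refl 1) (by omega) (by omega)
  set M := findL (num.toNat + 2) num 1 with hMdef
  have hMnum : M ≤ num := by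
    by_contra h
    push_neg at h
    nlinarith
  have hinv : ∀ L', M < L' → ¬ ValidLen num L' := by
    rintro L' hlt ⟨s, hs1, hEq⟩
    have hL'1 : 1 ≤ L' := by omega
    nlinarith
  exact downL_correct num hnum (num.toNat + 2) M hM1 (by omega) hinv

-- ===== VERDICT (by name: the statement is the Claim_ definition above) =====
theorem start_num_spec : Claim_equal_start_num := by
  intro num _ hpre
  unfold Spec_start_num
  obtain ⟨hA, hAmin⟩ := start_num_minimal num hpre
  obtain ⟨hB, hBmin⟩ := start_num_alt_minimal num hpre
  exact min_unique hA hB hAmin hBmin
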